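-- pv_equiv track=rewrite | github.com/jplawdb4/jplawdb4 | split_oversized.py | get_line_boundaries
-- ===== SOURCE A (Python) =====
-- def get_line_boundaries(body: str):
--     """行末位置のリストを返す（フォールバック用）"""
--     boundaries = []
--     pos = 0
--     for line in body.split("\n"):
--         pos += len(line) + 1  # +1 for \n
--         if pos < len(body):
--             boundaries.append(pos)
--     return boundaries
-- ===== SOURCE B (Python) =====
-- def get_line_boundaries(body: str):
--     """行末位置のリストを返す（フォールバック用）"""
--     n = len(body)
--     return [i + 1 for i, c in enumerate(body) if c == "\n" and i + 1 < n]
-- ===== Notes on version B (the rewrite author's own statement) =====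
-- stated objective: idiomatic
-- what changed: B drops the line-splitting pass and the running cumulative line-length accumulator: it scans the characters once with enumerate and collects i+1 for every newline whose successor position is still inside the string, never materialising the list of lines.
import Mathlib
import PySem

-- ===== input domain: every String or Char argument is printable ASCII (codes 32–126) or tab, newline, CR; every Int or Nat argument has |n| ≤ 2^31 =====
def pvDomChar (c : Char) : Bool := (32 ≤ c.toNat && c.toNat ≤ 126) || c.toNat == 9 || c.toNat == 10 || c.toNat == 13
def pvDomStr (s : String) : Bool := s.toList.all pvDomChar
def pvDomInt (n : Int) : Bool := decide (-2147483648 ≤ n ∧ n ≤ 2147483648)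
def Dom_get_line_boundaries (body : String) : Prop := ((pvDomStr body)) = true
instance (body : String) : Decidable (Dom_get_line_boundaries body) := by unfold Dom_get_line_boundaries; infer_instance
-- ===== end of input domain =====

-- B replaces the line-splitting + cumulative line-length accumulation by a single enumerate scan
-- collecting i+1 for each interior newline (idiomatic; same O(n) cost).

-- ===== PORT A =====
def get_line_boundaries (body : String) : List Int :=
  let lines := (PySem.Str.split? body "\n").getD []
  (lines.foldl (fun (st : List Int × Int) line =>
      let pos := st.2 + PySem.Str.len line + 1
      (if pos < PySem.Str.len body then st.1 ++ [pos] else st.1, pos))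
    ([], 0)).1

-- ===== PORT B =====
def get_line_boundaries_alt (body : String) : List Int :=
  let n := PySem.Str.len body
  (PySem.List.enumerate body.toList 0).filterMap
    (fun ic => if ic.2 = '\n' ∧ ic.1 + 1 < n then some (ic.1 + 1) else none)

-- ===== PRECONDITION & SPEC =====
def Spec_get_line_boundaries (body : String) (out : List Int) : Prop := out = get_line_boundaries_alt body
instance (body : String) (out : List Int) : Decidable (Spec_get_line_boundaries body out) := by unfold Spec_get_line_boundaries; infer_instance

-- ===== CLAIM (what is proved, stated in full; the proofs are below) =====
def Claim_equal_get_line_boundaries : Prop := ∀ (body : String), Dom_get_line_boundaries body → Spec_get_line_boundaries body (get_line_boundaries body)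

-- ===== LEMMAS AND PROOFS =====

-- the straightforward structural split of a char list at '\n'
def pvSeg : List Char → List (List Char)
  | [] => [[]]
  | c :: rest =>
    if c = '\n' then [] :: pvSeg rest
    else
      match pvSeg rest with
      | [] => [[c]]
      | s :: ss => (c :: s) :: ss

theorem pvSeg_ne_nil (l : List Char) : pvSeg l ≠ [] := by
  cases l with
  | nil => simp [pvSeg]
  | cons c rest =>
    simp only [pvSeg]
    split_ifs
    · simp
    · cases h : pvSeg rest <;> simp

def pvConsHead (x : List Char) : List (List Char) → List (List Char)
  | [] => [x]
  | s :: ss => (x ++ s) :: ss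

theorem pvGo_eq (l : List Char) : ∀ (fuel : Nat) (cur : List Char) (acc : List (List Char)),
    l.length ≤ fuel →
    PySem.Chars.splitOn.go ['\n'] fuel l cur acc
      = acc.reverse ++ pvConsHead cur.reverse (pvSeg l) := by
  induction l with
  | nil =>
    intro fuel cur acc _
    cases fuel <;> simp [PySem.Chars.splitOn.go, pvSeg, pvConsHead]
  | cons c rest ih =>
    intro fuel cur acc hf
    cases fuel with
    | zero => simp at hf
    | succ fuel =>
      simp only [PySem.Chars.splitOn.go]
      by_cases hc : c = '\n'
      · subst hc
        have hpre : List.isPrefixOf ['\n'] ('\n' :: rest) = true := by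
          simp [List.isPrefixOf]
        rw [if_pos hpre]
        have hdrop : List.drop (['\n'] : List Char).length ('\n' :: rest) = rest := by simp
        rw [hdrop, ih fuel [] (cur.reverse :: acc) (by simpa using Nat.lt_succ_iff.mp (by simpa using hf))]
        cases h : pvSeg rest with
        | nil => exact absurd h (pvSeg_ne_nil rest)
        | cons s ss => simp [pvSeg, pvConsHead, h]
      · have hpre : List.isPrefixOf ['\n'] (c :: rest) = false := by
          simp [List.isPrefixOf]
          exact fun h => hc h.symm
        rw [if_neg (by simp [hpre])]
        rw [ih fuel (c :: cur) acc (by simpa using Nat.lt_succ_iff.mp (by simpa using hf))]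
        cases h : pvSeg rest with
        | nil => exact absurd h (pvSeg_ne_nil rest)
        | cons s ss => simp [pvSeg, hc, h, pvConsHead]

theorem pvSplitOn_newline (l : List Char) :
    PySem.Chars.splitOn l ['\n'] = pvSeg l := by
  have hgo := pvGo_eq l (l.length + 1) [] [] (by omega)
  rw [PySem.Chars.splitOn, hgo]
  cases h : pvSeg l with
  | nil => exact absurd h (pvSeg_ne_nil l)
  | cons s ss => simp [pvConsHead]

-- A's accumulator step, written out (used only by the proofs)
def pvStep (n : Int) (st : List Int × Int) (s : List Char) : List Int × Int :=
  (if st.2 + (s.length : Int) + 1 < n then st.1 ++ [st.2 + (s.length : Int) + 1] else st.1,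
   st.2 + (s.length : Int) + 1)

-- the fold over the segments equals the enumerate scan, pos tracking the offset
theorem pvFold_eq (n : Int) (l : List Char) : ∀ (pos : Int) (bs : List Int),
    pos = n - l.length →
    ((pvSeg l).foldl (pvStep n) (bs, pos)).1
      = bs ++ (PySem.List.enumerate l pos).filterMap
          (fun ic => if ic.2 = '\n' ∧ ic.1 + 1 < n then some (ic.1 + 1) else none) := by
  induction l with
  | nil =>
    intro pos bs hpos
    simp at hpos
    subst hpos
    simp [pvSeg, pvStep, PySem.List.enumerate]
  | cons c rest ih =>
    intro pos bs hpos
    by_cases hc : c = '\n'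
    · subst hc
      rw [show pvSeg ('\n' :: rest) = [] :: pvSeg rest from by simp [pvSeg]]
      rw [List.foldl_cons]
      rw [show pvStep n (bs, pos) ([] : List Char)
            = ((if pos + 1 < n then bs ++ [pos + 1] else bs, pos + 1)) from by
        simp [pvStep]]
      rw [ih (pos + 1) (if pos + 1 < n then bs ++ [pos + 1] else bs)
        (by simp at hpos ⊢; omega)]
      rw [PySem.List.enumerate_cons, List.filterMap_cons]
      by_cases hlt : pos + 1 < n
      · simp [hlt]
      · simp [hlt]
    · cases h : pvSeg rest with
      | nil => exact absurd h (pvSeg_ne_nil rest)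
      | cons s ss =>
        rw [show pvSeg (c :: rest) = (c :: s) :: ss from by
          simp only [pvSeg, if_neg hc, h]]
        have hstep : pvStep n (bs, pos) (c :: s) = pvStep n (bs, pos + 1) s := by
          have e : pos + ((s.length + 1 : Nat) : Int) + 1 = (pos + 1) + (s.length : Int) + 1 := by
            push_cast; ring
          simp only [pvStep, List.length_cons, e]
        rw [List.foldl_cons, hstep, ← List.foldl_cons, ← h]
        rw [ih (pos + 1) bs (by simp at hpos ⊢; omega)]
        rw [PySem.List.enumerate_cons, List.filterMap_cons]
        simp [hc]

-- ===== VERDICT (by name: the statement is the Claim_ definition above) =====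
theorem get_line_boundaries_spec : Claim_equal_get_line_boundaries := by
  intro body _
  unfold Spec_get_line_boundaries get_line_boundaries get_line_boundaries_alt
  have hsplit : PySem.Str.split? body "\n"
      = some (List.map String.ofList (pvSeg body.toList)) := by
    rw [PySem.Str.split?]
    have hch : PySem.Chars.split? body.toList "\n".toList
        = some (pvSeg body.toList) := by
      rw [PySem.Chars.split?]
      rw [show ("\n".toList : List Char) = ['\n'] from by decide]
      simp [pvSplitOn_newline]
    rw [hch]
    rfl
  rw [hsplit]
  simp only [Option.getD_some, List.foldl_map]
  have hlen : ∀ s : List Char, PySem.Str.len (String.ofList s) = (s.length : Int) := by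
    intro s; simp [PySem.Str.len_eq]
  simp only [hlen, PySem.Str.len_eq]
  have hmain := pvFold_eq (body.toList.length : Int) body.toList 0 [] (by simp)
  simpa using hmain
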